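-- pv_equiv track=rewrite | github.com/kyotoai/SEIMEI | exp8_csv_small/train_v3.py | truncate_messages_before_step
-- ===== SOURCE A (Python) =====
-- from typing import Any, Dict, List, Optional, Sequence, Set, Tuple, Union
--
-- def truncate_messages_before_step(messages: Sequence[Dict[str, Any]], step: int) -> List[Dict[str, Any]]:
--     if step <= 1:
--         truncated: List[Dict[str, Any]] = []
--         agent_seen = 0
--         for msg in messages:
--             if msg.get("role") == "agent":
--                 agent_seen += 1
--                 if agent_seen >= 1:
--                     break
--             truncated.append(dict(msg))
--         return truncated
--
--     truncated = []
--     agent_seen = 0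
--     for msg in messages:
--         if msg.get("role") == "agent":
--             agent_seen += 1
--             if agent_seen >= step:
--                 break
--         truncated.append(dict(msg))
--     return truncated
-- ===== SOURCE B (Python) =====
-- from typing import Any, Dict, List, Sequence
--
-- def truncate_messages_before_step(messages: Sequence[Dict[str, Any]], step: int) -> List[Dict[str, Any]]:
--     k = max(step, 1)
--     positions = [i for i, m in enumerate(messages) if m.get("role") == "agent"]
--     cutoff = positions[k - 1] if len(positions) >= k else len(messages)
--     return [dict(m) for m in messages[:cutoff]]
-- ===== Notes on version B (the rewrite author's own statement) =====
-- stated objective: alternative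
-- what changed: B first materialises the full index list of all agent-message positions (one comprehension, no early break), then picks the k-th position (or the list length) by direct indexing and copies that prefix, instead of A's two duplicated copy-and-break scan loops selected by a step<=1 branch.
import Mathlib
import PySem

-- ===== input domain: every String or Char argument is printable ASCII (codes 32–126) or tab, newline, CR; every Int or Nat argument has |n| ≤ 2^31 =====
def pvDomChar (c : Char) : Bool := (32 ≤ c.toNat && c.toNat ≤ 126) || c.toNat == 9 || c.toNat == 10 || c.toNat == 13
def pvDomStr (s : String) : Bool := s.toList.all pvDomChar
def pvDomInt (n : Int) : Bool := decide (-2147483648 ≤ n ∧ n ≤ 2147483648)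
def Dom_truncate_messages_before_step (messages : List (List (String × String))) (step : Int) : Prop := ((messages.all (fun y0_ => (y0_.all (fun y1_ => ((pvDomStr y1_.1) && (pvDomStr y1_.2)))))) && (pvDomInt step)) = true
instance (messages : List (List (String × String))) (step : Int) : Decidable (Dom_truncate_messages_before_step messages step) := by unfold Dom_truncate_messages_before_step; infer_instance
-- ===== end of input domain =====

-- B builds the full index list of agent-message positions, then cuts at the k-th one by direct
-- indexing, replacing A's two duplicated copy-and-break loops; same behaviour and O(n) cost.


-- ===== PORT A =====
-- the for-loop of A (both branches share this shape): append dict-copies until the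
-- thr-th message with role == "agent" is seen, then break.  dict(msg) is a copy = identity here.
def pvLoopA (thr : Int) : List (List (String × String)) → Int → List (List (String × String))
  | [], _ => []
  | msg :: rest, seen =>
    if (PySem.Dict.mk msg).get? "role" == some "agent" then
      if seen + 1 ≥ thr then []
      else msg :: pvLoopA thr rest (seen + 1)
    else msg :: pvLoopA thr rest seen

def truncate_messages_before_step (messages : List (List (String × String))) (step : Int) : List (List (String × String)) :=
  if step ≤ 1 then pvLoopA 1 messages 0 else pvLoopA step messages 0

-- ===== PORT B =====
-- [i for i, m in enumerate(messages) if m.get("role") == "agent"]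
-- (zipIdx pairs each element with its index, like enumerate with components swapped)
def pvAgentPositions (msgs : List (List (String × String))) : List Nat :=
  ((msgs.zipIdx).filter (fun p => (PySem.Dict.mk p.1).get? "role" == some "agent")).map (fun p => p.2)

def truncate_messages_before_step_alt (messages : List (List (String × String))) (step : Int) : List (List (String × String)) :=
  let k : Int := max step 1
  let positions := pvAgentPositions messages
  -- positions[k-1] if len(positions) >= k else len(messages); k ≥ 1 so (k-1).toNat is exact
  let cutoff : Nat := if (positions.length : Int) ≥ k then positions.getD (k - 1).toNat 0 else messages.length
  (messages.take cutoff).map (fun m => m)   -- [dict(m) for m in messages[:cutoff]]; dict(m) is a copy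

-- ===== PRECONDITION & SPEC =====
def Spec_truncate_messages_before_step (messages : List (List (String × String))) (step : Int) (out : List (List (String × String))) : Prop := out = truncate_messages_before_step_alt messages step
instance (messages : List (List (String × String))) (step : Int) (out : List (List (String × String))) : Decidable (Spec_truncate_messages_before_step messages step out) := by unfold Spec_truncate_messages_before_step; infer_instance

-- ===== CLAIM (what is proved, stated in full; the proofs are below) =====
def Claim_equal_truncate_messages_before_step : Prop := ∀ (messages : List (List (String × String))) (step : Int), Dom_truncate_messages_before_step messages step → Spec_truncate_messages_before_step messages step (truncate_messages_before_step messages step)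

-- ===== LEMMAS AND PROOFS =====

-- B's cutoff as a function of the remaining threshold
def pvCut (j : Int) (msgs : List (List (String × String))) : Nat :=
  if ((pvAgentPositions msgs).length : Int) ≥ j then (pvAgentPositions msgs).getD (j - 1).toNat 0 else msgs.length

theorem pvZipIdx_shift (P : (List (String × String)) × Nat → Bool)
    (hP : ∀ m i j, P (m, i) = P (m, j)) (rest : List (List (String × String))) (n : Nat) :
    ((rest.zipIdx (n + 1)).filter P).map (fun p => p.2)
      = (((rest.zipIdx n).filter P).map (fun p => p.2)).map (fun i => i + 1) := by
  induction rest generalizing n with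
  | nil => rfl
  | cons m rest ih =>
    simp only [List.zipIdx_cons, List.filter_cons]
    rw [hP m (n+1) n]
    cases h : P (m, n) <;> simp [h, ih]

theorem pvAgentPositions_cons (m : List (String × String)) (rest : List (List (String × String))) :
    pvAgentPositions (m :: rest)
      = if (PySem.Dict.mk m).get? "role" == some "agent"
        then 0 :: (pvAgentPositions rest).map (fun i => i + 1)
        else (pvAgentPositions rest).map (fun i => i + 1) := by
  unfold pvAgentPositions
  simp only [List.zipIdx_cons, List.filter_cons]
  cases h : (PySem.Dict.mk m).get? "role" == some "agent" <;>
    simp only [h, if_true, Bool.false_eq_true, if_false, List.map_cons] <;>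
    rw [pvZipIdx_shift _ (fun _ _ _ => rfl)]

theorem pvGetD_map_add_one (l : List Nat) (i : Nat) (h : i < l.length) :
    (l.map (fun x => x + 1)).getD i 0 = l.getD i 0 + 1 := by
  induction l generalizing i with
  | nil => simp at h
  | cons a l ih =>
    cases i with
    | zero => rfl
    | succ i => simpa using ih i (by simpa using h)

theorem pvLoopA_eq_take (msgs : List (List (String × String))) (k seen : Int)
    (hk : k - seen ≥ 1) : pvLoopA k msgs seen = msgs.take (pvCut (k - seen) msgs) := by
  induction msgs generalizing seen with
  | nil => simp [pvLoopA, pvCut]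
  | cons m rest ih =>
    simp only [pvLoopA]
    cases h : (PySem.Dict.mk m).get? "role" == some "agent" with
    | true =>
      simp only [h, if_true]
      unfold pvCut
      rw [pvAgentPositions_cons, h]
      simp only [if_true, List.length_cons, List.length_map]
      by_cases hb : seen + 1 ≥ k
      · -- break: k - seen = 1, cutoff = positions[0] = 0
        have hj : k - seen = 1 := by omega
        rw [hj]
        simp [hb]
      · simp only [if_neg hb]
        rw [ih (seen + 1) (by omega)]
        unfold pvCut
        set pos := pvAgentPositions rest with hpos
        split_ifs with h1 h2 h2
        · have hidx : (k - seen - 1).toNat = (k - (seen + 1) - 1).toNat + 1 := by omega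
          rw [hidx]
          simp only [List.getD_cons_succ]
          rw [pvGetD_map_add_one _ _ (by omega)]
          rw [List.take_succ_cons]
        · exfalso; omega
        · exfalso; omega
        · simp
    | false =>
      simp only [h, Bool.false_eq_true, if_false]
      rw [ih seen hk]
      unfold pvCut
      rw [pvAgentPositions_cons, h]
      simp only [Bool.false_eq_true, if_false, List.length_map]
      set pos := pvAgentPositions rest with hpos
      split_ifs with hc
      · rw [pvGetD_map_add_one _ _ (by omega)]
        simp
      · simp

-- ===== VERDICT (by name: the statement is the Claim_ definition above) =====
theorem truncate_messages_before_step_spec : Claim_equal_truncate_messages_before_step := by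
  intro messages step _
  unfold Spec_truncate_messages_before_step truncate_messages_before_step truncate_messages_before_step_alt
  simp only [List.map_id']
  by_cases h : step ≤ 1
  · rw [if_pos h, pvLoopA_eq_take messages 1 0 (by omega)]
    have hm : max step 1 = 1 := by omega
    simp [pvCut, hm]
  · rw [if_neg h, pvLoopA_eq_take messages step 0 (by omega)]
    have hm : max step 1 = step := by omega
    simp [pvCut, hm]
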